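-- pv_equiv track=rewrite | github.com/jjca/proyecto-libre-ci5437 | constraint-puzzles/sudoku.py | cells_from_txt
-- ===== SOURCE A (Python) =====
-- def cells_from_txt(txt):
--     #strip comments
--     txt = '\n'.join(i.split('#')[0] for i in txt.split('\n'))
--     cells = []
--     idx=0
--     txt = txt.replace('.','0')
--     for i in txt:
--         if i in '01234567890':
--             if idx%9==0:
--                 cells.append([])
--             idx+=1
--             cells[-1].append(int(i))
--         if idx/9 ==9: break
--     return cells
-- ===== SOURCE B (Python) =====
-- def _chunk9(l):
--     if not l:
--         return []
--     return [l[:9]] + _chunk9(l[9:])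
--
-- def cells_from_txt(txt):
--     txt = '\n'.join(line.split('#')[0] for line in txt.split('\n'))
--     txt = txt.replace('.', '0')
--     digits = [int(c) for c in txt if c in '0123456789'][:81]
--     return _chunk9(digits)
-- ===== Notes on version B (the rewrite author's own statement) =====
-- stated objective: simpler
-- what changed: A's single character loop with an inline idx counter, idx%9 row-opening and a mid-loop break at 81 is replaced by two plain passes: filter out the first 81 digit characters with a comprehension, then chunk them into rows of 9.
import Mathlib
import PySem

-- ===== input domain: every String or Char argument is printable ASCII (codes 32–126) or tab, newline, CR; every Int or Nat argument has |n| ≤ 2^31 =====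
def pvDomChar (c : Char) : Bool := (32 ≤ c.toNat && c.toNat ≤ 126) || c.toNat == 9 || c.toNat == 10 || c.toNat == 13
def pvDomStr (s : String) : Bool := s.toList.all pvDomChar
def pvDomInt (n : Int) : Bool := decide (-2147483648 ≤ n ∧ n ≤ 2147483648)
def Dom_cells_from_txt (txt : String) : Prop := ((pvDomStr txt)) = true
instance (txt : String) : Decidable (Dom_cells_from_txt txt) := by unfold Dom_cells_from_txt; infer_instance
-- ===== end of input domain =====

-- B replaces A's single char loop (inline idx counter, idx%9 row opening, mid-loop break at 81) by two
-- plain passes: filter out the first 81 digit characters, then chunk them into rows of 9 (objective: simpler).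

-- ===== PORT A =====
-- '\n'.join(i.split('#')[0] for i in txt.split('\n'))  ; split never returns [], so [0] via pyGetD is exact
def pvAStrip (txt : List Char) : List Char :=
  PySem.Chars.join ['\n']
    ((PySem.Chars.splitOn txt ['\n']).map (fun i => PySem.List.pyGetD (PySem.Chars.splitOn i ['#']) 0 []))

-- cells[-1].append(v); A only calls this with cells ≠ [] (an empty row was just appended when idx%9==0)
def pvAAppendLast : List (List Int) → Int → List (List Int)
  | [], _ => []
  | [r], v => [r ++ [v]]
  | r :: rs, v => r :: pvAAppendLast rs v

-- the for-loop over the characters, state (cells, idx); 'if idx/9 == 9: break' fires exactly at idx = 81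
def pvALoop : List Char → List (List Int) → Nat → List (List Int)
  | [], cells, _ => cells
  | c :: rest, cells, idx =>
    let st :=
      if PySem.Chars.isIn [c] ['0','1','2','3','4','5','6','7','8','9','0'] then
        (pvAAppendLast (if idx % 9 = 0 then cells ++ [[]] else cells)
          ((PySem.Int.ofChars? [c]).getD 0), idx + 1)
      else (cells, idx)
    if st.2 = 81 then st.1 else pvALoop rest st.1 st.2

def cells_from_txt (txt : String) : List (List Int) :=
  pvALoop (PySem.Chars.replace (pvAStrip txt.toList) ['.'] ['0']) [] 0

-- ===== PORT B =====
-- same comment stripping as Source B's first line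
def pvBStrip (txt : List Char) : List Char :=
  PySem.Chars.join ['\n']
    ((PySem.Chars.splitOn txt ['\n']).map (fun line => PySem.List.pyGetD (PySem.Chars.splitOn line ['#']) 0 []))

-- _chunk9(l) = [] if not l else [l[:9]] + _chunk9(l[9:])
def pvBChunk9 (l : List Int) : List (List Int) :=
  if l = [] then []
  else PySem.List.slice l none (some 9) :: pvBChunk9 (PySem.List.slice l (some 9) none)
termination_by l.length
decreasing_by
  rw [PySem.List.slice_from l (by norm_num)]
  have hl : l ≠ [] := by assumption
  have hp := List.length_pos_of_ne_nil hl
  rw [show (9:Int).toNat = 9 from rfl]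
  simp only [List.length_drop]
  omega

def cells_from_txt_alt (txt : String) : List (List Int) :=
  let t := PySem.Chars.replace (pvBStrip txt.toList) ['.'] ['0']
  let digits := (t.filter (fun c => PySem.Chars.isIn [c] ['0','1','2','3','4','5','6','7','8','9'])).map
      (fun c => (PySem.Int.ofChars? [c]).getD 0)
  pvBChunk9 (PySem.List.slice digits none (some 81))

-- ===== PRECONDITION & SPEC =====
def Spec_cells_from_txt (txt : String) (out : List (List Int)) : Prop := out = cells_from_txt_alt txt
instance (txt : String) (out : List (List Int)) : Decidable (Spec_cells_from_txt txt out) := by unfold Spec_cells_from_txt; infer_instance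

-- ===== CLAIM (what is proved, stated in full; the proofs are below) =====
def Claim_equal_cells_from_txt : Prop := ∀ (txt : String), Dom_cells_from_txt txt → Spec_cells_from_txt txt (cells_from_txt txt)

-- ===== LEMMAS AND PROOFS =====

-- B's digit list, as a function of the preprocessed character list (proof-side shorthand)
def pvDigits (cs : List Char) : List Int :=
  (cs.filter (fun c => PySem.Chars.isIn [c] ['0','1','2','3','4','5','6','7','8','9'])).map
    (fun c => (PySem.Int.ofChars? [c]).getD 0)

-- chunking restated through take/drop
lemma pvBChunk9_eq (l : List Int) :
    pvBChunk9 l = if l = [] then [] else l.take 9 :: pvBChunk9 (l.drop 9) := by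
  rw [pvBChunk9.eq_def]
  split_ifs with h
  · rfl
  · rw [PySem.List.slice_to l (by norm_num), PySem.List.slice_from l (by norm_num)]
    rw [show (9:Int).toNat = 9 from rfl]

lemma pvBChunk9_ne_nil (l : List Int) (h : l ≠ []) : pvBChunk9 l ≠ [] := by
  rw [pvBChunk9_eq]; simp [h]

-- the two digit tests agree ('01234567890' merely repeats '0')
lemma pvDigit_eq (c : Char) :
    PySem.Chars.isIn [c] ['0','1','2','3','4','5','6','7','8','9','0']
      = PySem.Chars.isIn [c] ['0','1','2','3','4','5','6','7','8','9'] := by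
  rw [Bool.eq_iff_iff, PySem.Chars.isIn_iff_infix, PySem.Chars.isIn_iff_infix,
    List.singleton_infix_iff, List.singleton_infix_iff]
  simp only [List.mem_cons, List.not_mem_nil, or_false]
  tauto

lemma pvAAppendLast_snoc (xs : List (List Int)) (r : List Int) (v : Int) :
    pvAAppendLast (xs ++ [r]) v = xs ++ [r ++ [v]] := by
  induction xs with
  | nil => rfl
  | cons x xs ih =>
    cases xs with
    | nil => simp [pvAAppendLast]
    | cons y ys => simpa [pvAAppendLast] using ih

lemma pvAAppendLast_cons (x : List Int) (xs : List (List Int)) (v : Int) (h : xs ≠ []) :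
    pvAAppendLast (x :: xs) v = x :: pvAAppendLast xs v := by
  cases xs with
  | nil => exact absurd rfl h
  | cons y ys => rfl

-- appending one digit to the flat list is exactly A's "open a new row / extend the last row" step
lemma pvChunk_snoc (v : Int) : ∀ (n : Nat) (d : List Int), d.length = n →
    pvBChunk9 (d ++ [v]) =
      if d.length % 9 = 0 then pvBChunk9 d ++ [[v]] else pvAAppendLast (pvBChunk9 d) v := by
  intro n
  induction n using Nat.strong_induction_on with
  | _ n ih =>
    intro d hd
    rcases eq_or_ne d [] with h0 | h0
    · subst h0
      simp [pvBChunk9_eq]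
    · have hlen : 0 < d.length := List.length_pos_of_ne_nil h0
      by_cases h9 : d.length < 9
      · have hm : d.length % 9 = d.length := Nat.mod_eq_of_lt h9
        rw [if_neg (by omega)]
        rw [pvBChunk9_eq (d ++ [v]), pvBChunk9_eq d]
        rw [if_neg (by simp), if_neg h0]
        have ht1 : (d ++ [v]).take 9 = d ++ [v] := List.take_of_length_le (by simp; omega)
        have ht2 : (d ++ [v]).drop 9 = [] := List.drop_eq_nil_of_le (by simp; omega)
        have ht3 : d.take 9 = d := List.take_of_length_le (by omega)
        have ht4 : d.drop 9 = [] := List.drop_eq_nil_of_le (by omega)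
        rw [ht1, ht2, ht3, ht4]
        rw [show pvBChunk9 [] = [] from by rw [pvBChunk9_eq]; rfl]
        cases d with
        | nil => exact absurd rfl h0
        | cons x xs => simp [pvAAppendLast]
      · have h9 := Nat.le_of_not_lt h9
        rw [pvBChunk9_eq (d ++ [v]), pvBChunk9_eq d, if_neg (by simp), if_neg h0]
        have ht1 : (d ++ [v]).take 9 = d.take 9 := List.take_append_of_le_length h9
        have ht2 : (d ++ [v]).drop 9 = d.drop 9 ++ [v] := List.drop_append_of_le_length h9
        have ihd := ih ((d.drop 9).length) (by simp only [List.length_drop]; omega) (d.drop 9) rfl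
        rw [ht1, ht2, ihd]
        by_cases hm : d.length % 9 = 0
        · rw [if_pos (by simp only [List.length_drop]; omega), if_pos hm]
          simp
        · rw [if_neg (by simp only [List.length_drop]; omega), if_neg hm]
          rw [pvAAppendLast_cons _ _ _ (pvBChunk9_ne_nil _ (by
            intro hnil
            have := congrArg List.length hnil
            simp only [List.length_drop, List.length_nil] at this
            omega))]

-- loop invariant: cells = chunks of the digits seen so far, idx = their count (< 81)
lemma pvLoop_inv : ∀ (cs : List Char) (d : List Int), d.length < 81 →
    pvALoop cs (pvBChunk9 d) d.length = pvBChunk9 (d ++ (pvDigits cs).take (81 - d.length)) := by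
  intro cs
  induction cs with
  | nil => intro d hd; simp [pvALoop, pvDigits]
  | cons c cs ih =>
    intro d hd
    simp only [pvALoop, pvDigit_eq]
    by_cases hc : PySem.Chars.isIn [c] ['0','1','2','3','4','5','6','7','8','9'] = true
    · have hcells : pvAAppendLast (if d.length % 9 = 0 then pvBChunk9 d ++ [[]] else pvBChunk9 d)
          ((PySem.Int.ofChars? [c]).getD 0) = pvBChunk9 (d ++ [(PySem.Int.ofChars? [c]).getD 0]) := by
        by_cases hm : d.length % 9 = 0
        · rw [if_pos hm, pvAAppendLast_snoc, pvChunk_snoc _ d.length d rfl, if_pos hm]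
          simp
        · rw [if_neg hm, pvChunk_snoc _ d.length d rfl, if_neg hm]
      have hdig : pvDigits (c :: cs) = (PySem.Int.ofChars? [c]).getD 0 :: pvDigits cs := by
        simp [pvDigits, hc]
      by_cases h81 : d.length + 1 = 81
      · have h1 : 81 - d.length = 1 := by omega
        simp only [hc, if_true, hcells, h81, hdig, h1, List.take_succ_cons,
          List.take_zero]
      · have hlt : (d ++ [(PySem.Int.ofChars? [c]).getD 0]).length < 81 := by simp; omega
        have hih := ih (d ++ [(PySem.Int.ofChars? [c]).getD 0]) hlt
        simp only [List.length_append, List.length_cons, List.length_nil, Nat.zero_add] at hih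
        have hk : 81 - d.length = (81 - (d.length + 1)) + 1 := by omega
        simp only [hc, if_true, hcells, if_neg h81, hdig]
        rw [hih, hk, List.take_succ_cons, List.append_assoc]
        rfl
    · have hc' : PySem.Chars.isIn [c] ['0','1','2','3','4','5','6','7','8','9'] = false :=
        Bool.eq_false_iff.mpr hc
      have hdig : pvDigits (c :: cs) = pvDigits cs := by
        simp [pvDigits, hc']
      have h81 : d.length ≠ 81 := by omega
      simp only [hc', if_false, Bool.false_eq_true, if_neg h81, hdig]
      exact ih d hd

-- ===== VERDICT (by name: the statement is the Claim_ definition above) =====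
theorem cells_from_txt_spec : Claim_equal_cells_from_txt := by
  intro txt _
  unfold Spec_cells_from_txt cells_from_txt
  have h := pvLoop_inv (PySem.Chars.replace (pvAStrip txt.toList) ['.'] ['0']) [] (by norm_num)
  rw [show pvBChunk9 [] = [] from by rw [pvBChunk9_eq]; rfl] at h
  simp only [List.length_nil, Nat.sub_zero, List.nil_append] at h
  have halt : cells_from_txt_alt txt
      = pvBChunk9 ((pvDigits (PySem.Chars.replace (pvAStrip txt.toList) ['.'] ['0'])).take 81) := by
    show pvBChunk9 (PySem.List.slice
        (pvDigits (PySem.Chars.replace (pvAStrip txt.toList) ['.'] ['0'])) none (some 81)) = _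
    rw [PySem.List.slice_to _ (by norm_num : (0:Int) ≤ 81)]
    rw [show (81:Int).toNat = 81 from rfl]
  rw [halt]
  exact h
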